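-- pv_equiv track=rewrite | github.com/glen-w/TranscriptX | src/transcriptx/core/utils/file_rename.py | _looks_like_uuid
-- ===== SOURCE A (Python) =====
-- def _looks_like_uuid(key: str) -> bool:
--     """Return True if key looks like a UUID (e.g. state uses UUID-based keys)."""
--     if not key or len(key) != 36:
--         return False
--     parts = key.split("-")
--     return (
--         len(parts) == 5
--         and len(parts[0]) == 8
--         and len(parts[1]) == 4
--         and len(parts[2]) == 4
--         and len(parts[3]) == 4
--         and len(parts[4]) == 12
--         and all(p.isalnum() for p in parts)
--     )
-- ===== SOURCE B (Python) =====
-- def _looks_like_uuid(key: str) -> bool: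
--     """Return True if key looks like a UUID (e.g. state uses UUID-based keys)."""
--     if len(key) != 36:
--         return False
--     for i, c in enumerate(key):
--         if i in (8, 13, 18, 23):
--             if c != "-":
--                 return False
--         elif not c.isalnum():
--             return False
--     return True
-- ===== Notes on version B (the rewrite author's own statement) =====
-- stated objective: alternative
-- what changed: Replaces split-on-dash plus five substring length checks with a single positional pass: dashes required exactly at indices 8/13/18/23 and every other character alphanumeric, building no intermediate parts list.
import Mathlib
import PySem

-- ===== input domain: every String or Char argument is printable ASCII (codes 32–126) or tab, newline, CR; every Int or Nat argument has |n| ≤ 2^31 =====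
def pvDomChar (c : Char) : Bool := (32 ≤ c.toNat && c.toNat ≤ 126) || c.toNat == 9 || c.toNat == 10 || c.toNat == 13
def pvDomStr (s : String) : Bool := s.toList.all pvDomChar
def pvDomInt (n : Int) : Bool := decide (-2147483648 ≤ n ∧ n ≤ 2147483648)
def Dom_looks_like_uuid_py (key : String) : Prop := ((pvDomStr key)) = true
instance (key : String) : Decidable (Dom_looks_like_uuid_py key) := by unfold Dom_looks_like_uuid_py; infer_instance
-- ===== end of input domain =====

-- B replaces split("-") + five substring length checks with a single positional pass
-- (dashes exactly at indices 8/13/18/23, alphanumeric elsewhere): an alternative, list-free algorithm.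


-- ===== PORT A =====
-- Python: `if not key or len(key) != 36: return False`, then split on "-" and check the
-- five part lengths and all(p.isalnum()).  Python indexes parts[0]..parts[4] only after the
-- short-circuiting `len(parts) == 5 and`, which the inner match transliterates.
def looks_like_uuid_py (key : String) : Bool :=
  if decide (key = "") || !(PySem.Str.len key == 36) then false
  else
    match PySem.Str.split? key "-" with
    | none => false            -- unreachable: the separator "-" is non-empty
    | some parts =>
      parts.length == 5 &&
        match parts with
        | [p0, p1, p2, p3, p4] =>
          PySem.Str.len p0 == 8 && PySem.Str.len p1 == 4 && PySem.Str.len p2 == 4 &&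
          PySem.Str.len p3 == 4 && PySem.Str.len p4 == 12 &&
          parts.all (fun p => PySem.Str.strIsalnum p)
        | _ => false

-- ===== PORT B =====
-- the `for i, c in enumerate(key)` loop of Source B, with its early returns, as structural recursion
def uuidGo (i : Nat) (cs : List Char) : Bool :=
  match cs with
  | [] => true
  | c :: rest =>
    (if i = 8 ∨ i = 13 ∨ i = 18 ∨ i = 23 then c == '-' else PySem.Chars.isalnum c)
      && uuidGo (i + 1) rest

def looks_like_uuid_py_alt (key : String) : Bool :=
  if !(PySem.Str.len key == 36) then false
  else uuidGo 0 key.toList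

-- ===== PRECONDITION & SPEC =====
def Spec_looks_like_uuid_py (key : String) (out : Bool) : Prop := out = looks_like_uuid_py_alt key
instance (key : String) (out : Bool) : Decidable (Spec_looks_like_uuid_py key out) := by unfold Spec_looks_like_uuid_py; infer_instance

-- ===== CLAIM (what is proved, stated in full; the proofs are below) =====
def Claim_equal_looks_like_uuid_py : Prop := ∀ (key : String), Dom_looks_like_uuid_py key → Spec_looks_like_uuid_py key (looks_like_uuid_py key)

-- ===== LEMMAS AND PROOFS =====

-- the canonical UUID shape both programs recognise
def CanonUUID (l : List Char) : Prop :=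
  ∃ a b c d e : List Char,
    l = a ++ ('-' :: (b ++ ('-' :: (c ++ ('-' :: (d ++ ('-' :: e))))))) ∧
    a.length = 8 ∧ b.length = 4 ∧ c.length = 4 ∧ d.length = 4 ∧ e.length = 12 ∧
    (∀ x ∈ a, PySem.Chars.isalnum x = true) ∧ (∀ x ∈ b, PySem.Chars.isalnum x = true) ∧
    (∀ x ∈ c, PySem.Chars.isalnum x = true) ∧ (∀ x ∈ d, PySem.Chars.isalnum x = true) ∧
    (∀ x ∈ e, PySem.Chars.isalnum x = true)

-- reference single-char split (what PySem.Chars.splitOn computes for separator "-")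
def mysplit : List Char → List Char → List (List Char)
  | pre, [] => [pre]
  | pre, c :: t => if c = '-' then pre :: mysplit [] t else mysplit (pre ++ [c]) t

theorem splitOn_go_spec (l : List Char) : ∀ (fuel : Nat) (cur : List Char)
    (acc : List (List Char)), l.length ≤ fuel →
    PySem.Chars.splitOn.go ['-'] fuel l cur acc = acc.reverse ++ mysplit cur.reverse l := by
  induction l with
  | nil =>
    intro fuel cur acc _
    cases fuel <;> simp [PySem.Chars.splitOn.go, mysplit]
  | cons c t ih =>
    intro fuel cur acc hf
    cases fuel with
    | zero => simp at hf
    | succ f =>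
      by_cases hc : c = '-'
      · subst hc
        have hstep : PySem.Chars.splitOn.go ['-'] (f+1) ('-'::t) cur acc
            = PySem.Chars.splitOn.go ['-'] f t [] (cur.reverse :: acc) := by
          simp [PySem.Chars.splitOn.go, List.isPrefixOf]
        rw [hstep, ih f [] (cur.reverse :: acc) (by simpa using hf)]
        simp [mysplit]
      · have hstep : PySem.Chars.splitOn.go ['-'] (f+1) (c::t) cur acc
            = PySem.Chars.splitOn.go ['-'] f t (c :: cur) acc := by
          simp [PySem.Chars.splitOn.go, List.isPrefixOf]
          intro h; exact absurd h.symm hc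
        rw [hstep, ih f (c :: cur) acc (by simpa using hf)]
        simp [mysplit, hc]

theorem splitOn_dash (l : List Char) : PySem.Chars.splitOn l ['-'] = mysplit [] l := by
  have := splitOn_go_spec l (l.length + 1) [] [] (by omega)
  simpa [PySem.Chars.splitOn] using this

theorem mysplit_no_dash (p : List Char) : ∀ pre, '-' ∉ p → mysplit pre p = [pre ++ p] := by
  induction p with
  | nil => intro pre _; simp [mysplit]
  | cons c t ih =>
    intro pre hp
    have hc : ¬ c = '-' := by intro h; exact hp (by simp [h])
    have ht : '-' ∉ t := fun h => hp (by simp [h])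
    simp [mysplit, hc, ih (pre ++ [c]) ht]

theorem mysplit_dash (p : List Char) : ∀ pre rest, '-' ∉ p →
    mysplit pre (p ++ '-' :: rest) = (pre ++ p) :: mysplit [] rest := by
  induction p with
  | nil => intro pre rest _; simp [mysplit]
  | cons c t ih =>
    intro pre rest hp
    have hc : ¬ c = '-' := by intro h; exact hp (by simp [h])
    have ht : '-' ∉ t := fun h => hp (by simp [h])
    simp [mysplit, hc, ih (pre ++ [c]) rest ht]

def myJoin : List (List Char) → List Char
  | [] => []
  | [p] => p
  | p :: ps => p ++ '-' :: myJoin ps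

theorem mysplit_ne_nil (l : List Char) (pre : List Char) : mysplit pre l ≠ [] := by
  induction l generalizing pre with
  | nil => simp [mysplit]
  | cons c t ih =>
    by_cases hc : c = '-' <;> simp [mysplit, hc, ih]

theorem myJoin_mysplit (l : List Char) : ∀ pre, myJoin (mysplit pre l) = pre ++ l := by
  induction l with
  | nil => intro pre; simp [mysplit, myJoin]
  | cons c t ih =>
    intro pre
    by_cases hc : c = '-'
    · subst hc
      have hIH : myJoin (mysplit [] t) = t := by simpa using ih []
      cases hq : mysplit [] t with
      | nil => exact absurd hq (mysplit_ne_nil t [])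
      | cons q qs =>
        rw [hq] at hIH
        simp [mysplit, hq, myJoin, hIH]
    · simp [mysplit, hc, ih (pre ++ [c])]

theorem uuidGo_iff (cs : List Char) : ∀ i, uuidGo i cs = true ↔
    ∀ j (h : j < cs.length),
      (if i + j = 8 ∨ i + j = 13 ∨ i + j = 18 ∨ i + j = 23 then cs[j] = '-'
       else PySem.Chars.isalnum cs[j] = true) := by
  induction cs with
  | nil => intro i; simp [uuidGo]
  | cons c t ih =>
    intro i
    rw [uuidGo, Bool.and_eq_true, ih (i+1)]
    constructor
    · rintro ⟨h0, hrest⟩ j hj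
      cases j with
      | zero =>
        simp only [Nat.add_zero, List.getElem_cons_zero]
        split at h0 <;> simp_all
      | succ j =>
        have := hrest j (by simpa using Nat.lt_of_succ_lt_succ hj)
        simpa [Nat.add_comm, Nat.add_left_comm, Nat.add_assoc] using this
    · intro h
      constructor
      · have h0 := h 0 (by simp)
        simp only [Nat.add_zero, List.getElem_cons_zero] at h0
        split at h0 <;> simp_all
      · intro j hj
        have := h (j+1) (by simpa using Nat.succ_lt_succ hj)
        simpa [Nat.add_comm, Nat.add_left_comm, Nat.add_assoc] using this

theorem uuidGo_append_alnum (p : List Char) : ∀ (i : Nat) (rest : List Char),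
    (∀ c ∈ p, PySem.Chars.isalnum c = true) →
    (∀ j, i ≤ j → j < i + p.length → ¬(j = 8 ∨ j = 13 ∨ j = 18 ∨ j = 23)) →
    uuidGo i (p ++ rest) = uuidGo (i + p.length) rest := by
  induction p with
  | nil => intro i rest _ _; simp
  | cons c t ih =>
    intro i rest hal hnd
    have hni : ¬(i = 8 ∨ i = 13 ∨ i = 18 ∨ i = 23) := hnd i (le_refl i) (by simp)
    have hc : PySem.Chars.isalnum c = true := hal c (by simp)
    rw [List.cons_append, uuidGo]
    simp only [hni, if_false, hc, Bool.true_and]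
    rw [ih (i+1) rest (fun x hx => hal x (by simp [hx]))
        (fun j h1 h2 => hnd j (by omega) (by simp at h2 ⊢; omega))]
    congr 1
    simp; omega

-- elements of a take-of-drop slice come from indexed positions of l
theorem mem_take_drop {l : List Char} {k m : Nat} {x : Char}
    (hx : x ∈ (l.drop k).take m) : ∃ j, ∃ h : j < l.length, k ≤ j ∧ j < k + m ∧ x = l[j] := by
  obtain ⟨i, hi, hxe⟩ := List.mem_iff_getElem.mp hx
  have hi' : i < m ∧ i < l.length - k := by
    simpa [List.length_take, List.length_drop, Nat.lt_min] using hi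
  refine ⟨k + i, by omega, by omega, by omega, ?_⟩
  rw [← hxe, List.getElem_take, List.getElem_drop]

theorem isEmpty_false_of_length_pos {q : List Char} (h : 0 < q.length) : q.isEmpty = false := by
  cases q with
  | nil => simp at h
  | cons c t => simp

theorem A_true_iff (key : String) (hlen : key.toList.length = 36) :
    looks_like_uuid_py key = true ↔ CanonUUID key.toList := by
  have hkey : ¬ key = "" := by
    intro h; rw [h] at hlen; simp at hlen
  have hlen' : key.length = 36 := by simpa using hlen
  have hlen36 : (PySem.Str.len key == 36) = true := by
    simp [PySem.Str.len_eq, hlen]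
  rw [looks_like_uuid_py]
  rw [if_neg (by simp [hkey, hlen'])]
  have hsplit : PySem.Str.split? key "-" = some ((mysplit [] key.toList).map String.ofList) := by
    simp [PySem.Str.split?, PySem.Chars.split?, splitOn_dash]
  rw [hsplit]
  constructor
  · intro h
    simp only [Bool.and_eq_true, beq_iff_eq, List.length_map] at h
    obtain ⟨h5, hrest⟩ := h
    rcases hq : mysplit [] key.toList with _ | ⟨q0, _ | ⟨q1, _ | ⟨q2, _ | ⟨q3, _ | ⟨q4, _ | ⟨q5, qs⟩⟩⟩⟩⟩⟩ <;>
      rw [hq] at h5 <;> simp at h5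
    rw [hq] at hrest
    simp only [List.map_cons, List.map_nil, List.all_cons, List.all_nil,
      PySem.Str.len_eq, PySem.Str.strIsalnum_eq, String.toList_ofList,
      PySem.Chars.strIsalnum, Bool.and_eq_true, beq_iff_eq] at hrest
    obtain ⟨⟨⟨⟨⟨hl0, hl1⟩, hl2⟩, hl3⟩, hl4⟩, ⟨⟨_, ha0⟩, ⟨_, ha1⟩, ⟨_, ha2⟩, ⟨_, ha3⟩, ⟨_, ha4⟩, _⟩⟩ := hrest
    have hjoin : myJoin (mysplit [] key.toList) = key.toList := by
      simpa using myJoin_mysplit key.toList []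
    rw [hq] at hjoin
    simp only [myJoin] at hjoin
    refine ⟨q0, q1, q2, q3, q4, by simpa using hjoin.symm,
      by exact_mod_cast hl0, by exact_mod_cast hl1, by exact_mod_cast hl2,
      by exact_mod_cast hl3, by exact_mod_cast hl4,
      fun x hx => by simpa using List.all_eq_true.mp ha0 x hx,
      fun x hx => by simpa using List.all_eq_true.mp ha1 x hx,
      fun x hx => by simpa using List.all_eq_true.mp ha2 x hx,
      fun x hx => by simpa using List.all_eq_true.mp ha3 x hx,
      fun x hx => by simpa using List.all_eq_true.mp ha4 x hx⟩
  · rintro ⟨a, b, c, d, e, hdec, ha, hb, hc, hd, he, hAa, hAb, hAc, hAd, hAe⟩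
    have noDash : ∀ (p : List Char), (∀ x ∈ p, PySem.Chars.isalnum x = true) → '-' ∉ p := by
      intro p hp hmem
      have := hp '-' hmem
      exact absurd this (by decide)
    have hq : mysplit [] key.toList = [a, b, c, d, e] := by
      rw [hdec, mysplit_dash a [] _ (noDash a hAa)]
      rw [mysplit_dash b [] _ (noDash b hAb)]
      rw [mysplit_dash c [] _ (noDash c hAc)]
      rw [mysplit_dash d [] _ (noDash d hAd)]
      rw [mysplit_no_dash e [] (noDash e hAe)]
      simp
    rw [hq]
    simp only [List.map_cons, List.map_nil, List.length_cons, List.length_nil,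
      List.all_cons, List.all_nil, PySem.Str.len_eq, PySem.Str.strIsalnum_eq,
      String.toList_ofList, PySem.Chars.strIsalnum]
    simp [ha, hb, hc, hd, he,
      isEmpty_false_of_length_pos (by omega : 0 < a.length),
      isEmpty_false_of_length_pos (by omega : 0 < b.length),
      isEmpty_false_of_length_pos (by omega : 0 < c.length),
      isEmpty_false_of_length_pos (by omega : 0 < d.length),
      isEmpty_false_of_length_pos (by omega : 0 < e.length),
      List.all_eq_true]
    exact ⟨hAa, hAb, hAc, hAd, hAe⟩

theorem B_true_iff (key : String) (hlen : key.toList.length = 36) :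
    looks_like_uuid_py_alt key = true ↔ CanonUUID key.toList := by
  have hlen36 : (PySem.Str.len key == 36) = true := by
    simp [PySem.Str.len_eq, hlen]
  have hlen' : key.length = 36 := by simpa using hlen
  rw [looks_like_uuid_py_alt, if_neg (by simp [hlen'])]
  rw [uuidGo_iff key.toList 0]
  clear hlen' hlen36
  generalize key.toList = l at hlen ⊢
  constructor
  · intro P
    have P' : ∀ j (h : j < 36),
        (if j = 8 ∨ j = 13 ∨ j = 18 ∨ j = 23 then l[j]'(by omega) = '-'
         else PySem.Chars.isalnum (l[j]'(by omega)) = true) := by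
      intro j hj
      have := P j (by omega)
      simpa using this
    have hdash : ∀ j (hj : j < 36) (hd : j = 8 ∨ j = 13 ∨ j = 18 ∨ j = 23), l[j]'(by omega) = '-' := by
      intro j hj hd
      have := P' j hj
      rw [if_pos hd] at this
      exact this
    have halnum : ∀ j (hj : j < 36) (hd : ¬(j = 8 ∨ j = 13 ∨ j = 18 ∨ j = 23)),
        PySem.Chars.isalnum (l[j]'(by omega)) = true := by
      intro j hj hd
      have := P' j hj
      rw [if_neg hd] at this
      exact this
    -- decompose l by take/drop at the four dash positions
    have e1 : l = l.take 8 ++ l.drop 8 := (List.take_append_drop 8 l).symm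
    have e2 : l.drop 8 = '-' :: l.drop 9 := by
      rw [List.drop_eq_getElem_cons (by omega)]
      rw [hdash 8 (by omega) (by omega)]
    have e3 : l.drop 9 = (l.drop 9).take 4 ++ l.drop 13 := by
      conv_lhs => rw [← List.take_append_drop 4 (l.drop 9)]
      rw [List.drop_drop]
    have e4 : l.drop 13 = '-' :: l.drop 14 := by
      rw [List.drop_eq_getElem_cons (by omega)]
      rw [hdash 13 (by omega) (by omega)]
    have e5 : l.drop 14 = (l.drop 14).take 4 ++ l.drop 18 := by
      conv_lhs => rw [← List.take_append_drop 4 (l.drop 14)]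
      rw [List.drop_drop]
    have e6 : l.drop 18 = '-' :: l.drop 19 := by
      rw [List.drop_eq_getElem_cons (by omega)]
      rw [hdash 18 (by omega) (by omega)]
    have e7 : l.drop 19 = (l.drop 19).take 4 ++ l.drop 23 := by
      conv_lhs => rw [← List.take_append_drop 4 (l.drop 19)]
      rw [List.drop_drop]
    have e8 : l.drop 23 = '-' :: l.drop 24 := by
      rw [List.drop_eq_getElem_cons (by omega)]
      rw [hdash 23 (by omega) (by omega)]
    refine ⟨l.take 8, (l.drop 9).take 4, (l.drop 14).take 4, (l.drop 19).take 4, l.drop 24,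
      ?_, ?_, ?_, ?_, ?_, ?_, ?_, ?_, ?_, ?_, ?_⟩
    · conv_lhs => rw [e1, e2, e3, e4, e5, e6, e7, e8]
    · simp [hlen]
    · simp [List.length_take, List.length_drop, hlen]
    · simp [List.length_take, List.length_drop, hlen]
    · simp [List.length_take, List.length_drop, hlen]
    · simp [List.length_drop, hlen]
    · intro x hx
      have hx' : x ∈ (l.drop 0).take 8 := by simpa using hx
      obtain ⟨j, hjl, hk1, hk2, hxe⟩ := mem_take_drop hx'
      rw [hxe]; exact halnum j (by omega) (by omega)
    · intro x hx
      obtain ⟨j, hjl, hk1, hk2, hxe⟩ := mem_take_drop hx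
      rw [hxe]; exact halnum j (by omega) (by omega)
    · intro x hx
      obtain ⟨j, hjl, hk1, hk2, hxe⟩ := mem_take_drop hx
      rw [hxe]; exact halnum j (by omega) (by omega)
    · intro x hx
      obtain ⟨j, hjl, hk1, hk2, hxe⟩ := mem_take_drop hx
      rw [hxe]; exact halnum j (by omega) (by omega)
    · intro x hx
      have hx' : x ∈ (l.drop 24).take 12 := by
        rw [List.take_of_length_le (by simp [List.length_drop, hlen])]
        exact hx
      obtain ⟨j, hjl, hk1, hk2, hxe⟩ := mem_take_drop hx'
      rw [hxe]; exact halnum j (by omega) (by omega)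
  · rintro ⟨a, b, c, d, e, hdec, ha, hb, hc, hd, he, hAa, hAb, hAc, hAd, hAe⟩
    rw [← uuidGo_iff l 0, hdec]
    rw [uuidGo_append_alnum a 0 _ hAa (by intro j h1 h2; rw [ha] at h2; omega)]
    rw [ha]
    rw [show uuidGo (0 + 8) ('-' :: (b ++ ('-' :: (c ++ ('-' :: (d ++ ('-' :: e))))))) =
        uuidGo 9 (b ++ ('-' :: (c ++ ('-' :: (d ++ ('-' :: e)))))) from by
      rw [uuidGo]; norm_num]
    rw [uuidGo_append_alnum b 9 _ hAb (by intro j h1 h2; rw [hb] at h2; omega)]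
    rw [hb]
    rw [show uuidGo (9 + 4) ('-' :: (c ++ ('-' :: (d ++ ('-' :: e))))) =
        uuidGo 14 (c ++ ('-' :: (d ++ ('-' :: e)))) from by
      rw [uuidGo]; norm_num]
    rw [uuidGo_append_alnum c 14 _ hAc (by intro j h1 h2; rw [hc] at h2; omega)]
    rw [hc]
    rw [show uuidGo (14 + 4) ('-' :: (d ++ ('-' :: e))) = uuidGo 19 (d ++ ('-' :: e)) from by
      rw [uuidGo]; norm_num]
    rw [uuidGo_append_alnum d 19 _ hAd (by intro j h1 h2; rw [hd] at h2; omega)]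
    rw [hd]
    rw [show uuidGo (19 + 4) ('-' :: e) = uuidGo 24 e from by rw [uuidGo]; norm_num]
    rw [show (e : List Char) = e ++ [] from by simp]
    rw [uuidGo_append_alnum e 24 _ hAe (by intro j h1 h2; rw [he] at h2; omega)]
    rfl

theorem both_false_of_len_ne (key : String) (hlen : ¬ key.toList.length = 36) :
    looks_like_uuid_py key = false ∧ looks_like_uuid_py_alt key = false := by
  have hlen' : ¬ key.length = 36 := by simpa using hlen
  have hlenC : ¬ ((key.length : Int) = 36) := by exact_mod_cast hlen'
  constructor
  · rw [looks_like_uuid_py, if_pos]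
    by_cases hk : key = ""
    · simp [hk]
    · simp only [PySem.Str.len_eq]
      simp
      exact Or.inr (fun h => hlen' (by exact_mod_cast h))
  · rw [looks_like_uuid_py_alt, if_pos]
    simp only [PySem.Str.len_eq]
    simp
    exact fun h => hlen' (by exact_mod_cast h)

-- ===== VERDICT (by name: the statement is the Claim_ definition above) =====
theorem looks_like_uuid_py_spec : Claim_equal_looks_like_uuid_py := by
  intro key _
  unfold Spec_looks_like_uuid_py
  by_cases hlen : key.toList.length = 36
  · rw [Bool.eq_iff_iff, A_true_iff key hlen, B_true_iff key hlen]
  · obtain ⟨hA, hB⟩ := both_false_of_len_ne key hlen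
    rw [hA, hB]
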